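-- pv_equiv track=rewrite | github.com/hyebinkang/practice_code | sparta_algorithm/1st_week/pythonprac/hello.py | get_idx_naive
-- ===== SOURCE A (Python) =====
-- import string
-- import string
--
-- def get_idx_naive(word):
-- 		# O(N^2)
--     result = [-1]*len(string.ascii_lowercase)
--     for i in range(len(word)):
--         char = word[i]
--         for j in range(len(string.ascii_lowercase)):
--             lo = string.ascii_lowercase[j]
--             if result[j] == -1 and char == lo:
--                 result[j] = i
--     return result
-- ===== SOURCE B (Python) =====
-- def get_idx_naive(word):
--     # Single backward pass: an unconditional write means the lowest index wins,
--     # so no "already set" check and no inner 26-letter scan is needed.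
--     result = [-1] * 26
--     for i in reversed(range(len(word))):
--         idx = ord(word[i]) - 97
--         if 0 <= idx < 26:
--             result[idx] = i
--     return result
-- ===== Notes on version B (the rewrite author's own statement) =====
-- stated objective: faster
-- what changed: Replaces the nested scan over all 26 letters per character with a single backward pass that computes the slot by ord arithmetic and writes unconditionally (lowest index wins), eliminating the inner loop and the unset-check.
import Mathlib
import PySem

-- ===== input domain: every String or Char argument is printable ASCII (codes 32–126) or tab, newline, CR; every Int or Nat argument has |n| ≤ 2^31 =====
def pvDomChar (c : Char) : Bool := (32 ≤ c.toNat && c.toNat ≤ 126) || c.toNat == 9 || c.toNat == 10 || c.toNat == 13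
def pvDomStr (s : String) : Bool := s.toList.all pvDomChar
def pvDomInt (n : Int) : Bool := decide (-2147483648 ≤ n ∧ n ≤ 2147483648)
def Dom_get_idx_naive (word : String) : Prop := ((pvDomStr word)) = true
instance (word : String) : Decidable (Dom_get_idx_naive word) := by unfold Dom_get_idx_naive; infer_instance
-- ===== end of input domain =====

-- B replaces A's inner 26-letter scan by a single backward pass with ord arithmetic (faster by a constant factor).

-- ===== PORT A =====
-- string.ascii_lowercase
def asciiLowercase : List Char := "abcdefghijklmnopqrstuvwxyz".toList

def get_idx_naive (word : String) : List Int :=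
  let cs := word.toList
  (PySem.List.pyRange 0 cs.length 1).foldl (fun result i =>
      let char := PySem.List.pyGetD cs i ' '   -- word[i]; i always in range
      (PySem.List.pyRange 0 26 1).foldl (fun res j =>
          let lo := PySem.List.pyGetD asciiLowercase j ' '   -- j always in range
          if PySem.List.pyGetD res j 0 = -1 ∧ char = lo then PySem.List.pySetD res j i
          else res)
        result)
    (List.replicate 26 (-1))

-- ===== PORT B =====
def get_idx_naive_alt (word : String) : List Int :=
  let cs := word.toList
  ((PySem.List.pyRange 0 cs.length 1).reverse).foldl (fun result i =>
      let idx : Int := ((PySem.List.pyGetD cs i ' ').toNat : Int) - 97   -- ord(word[i]) - 97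
      if 0 ≤ idx ∧ idx < 26 then PySem.List.pySetD result idx i
      else result)
    (List.replicate 26 (-1))

-- ===== PRECONDITION & SPEC =====
def Spec_get_idx_naive (word : String) (out : List Int) : Prop := out = get_idx_naive_alt word
instance (word : String) (out : List Int) : Decidable (Spec_get_idx_naive word out) := by unfold Spec_get_idx_naive; infer_instance

-- ===== CLAIM (what is proved, stated in full; the proofs are below) =====
def Claim_equal_get_idx_naive : Prop := ∀ (word : String), Dom_get_idx_naive word → Spec_get_idx_naive word (get_idx_naive word)

-- ===== LEMMAS AND PROOFS =====

-- A's inner loop as a Nat-indexed fold: each step conditionally sets position j from the value at j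
theorem selfUpdate_length (g : Nat → Int → Bool) (v : Int) (L : List Nat) (res : List Int) :
    (L.foldl (fun r j => if g j (r.getD j 0) then r.set j v else r) res).length = res.length := by
  induction L generalizing res with
  | nil => rfl
  | cons j L ih =>
    simp only [List.foldl_cons]
    split
    · rw [ih]; simp
    · exact ih res

theorem selfUpdate_getD (g : Nat → Int → Bool) (v : Int) (L : List Nat)
    (res : List Int) (m : Nat) (hL : L.Nodup) (hm : m < res.length) :
    (L.foldl (fun r j => if g j (r.getD j 0) then r.set j v else r) res).getD m 0
      = if m ∈ L ∧ g m (res.getD m 0) then v else res.getD m 0 := by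
  induction L generalizing res with
  | nil => simp
  | cons j L ih =>
    have hnd : L.Nodup := (List.nodup_cons.mp hL).2
    have hjL : j ∉ L := (List.nodup_cons.mp hL).1
    simp only [List.foldl_cons]
    by_cases hj : m = j
    · subst hj
      by_cases h : g m (res.getD m 0) = true
      · rw [if_pos h, ih (res.set m v) hnd (by simpa using hm)]
        have h1 : (res.set m v).getD m 0 = v := by
          simp [List.getD, hm]
        simp [h1, hjL, h, -List.getD_eq_getElem?_getD]
      · rw [if_neg h, ih res hnd hm]
        simp [hjL, h, -List.getD_eq_getElem?_getD]
    · have hset : (res.set j v).getD m 0 = res.getD m 0 := by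
        simp [List.getD, List.getElem?_set_ne (by omega : j ≠ m)]
      by_cases h : g j (res.getD j 0) = true
      · rw [if_pos h, ih (res.set j v) hnd (by simpa using hm)]
        simp [hset, hj, -List.getD_eq_getElem?_getD]
      · rw [if_neg h, ih res hnd hm]
        simp [hj, -List.getD_eq_getElem?_getD]


-- first index paired with character c in ps, else the default d
def findD (ps : List (Int × Char)) (c : Char) (d : Int) : Int :=
  match ps.find? (fun p => p.2 = c) with
  | some p => p.1
  | none => d

theorem findD_nil (c : Char) (d : Int) : findD [] c d = d := rfl

theorem findD_cons (i : Int) (ch c : Char) (ps : List (Int × Char)) (d : Int) :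
    findD ((i, ch) :: ps) c d = if ch = c then i else findD ps c d := by
  by_cases h : ch = c <;> simp [findD, List.find?, h]

-- A's per-character step (the inner 26-letter loop), as a Nat-indexed fold
def fA (res : List Int) (p : Int × Char) : List Int :=
  (List.range 26).foldl
    (fun r j => if r.getD j 0 = -1 ∧ p.2 = asciiLowercase.getD j ' ' then r.set j p.1 else r) res

theorem fA_length (res : List Int) (p : Int × Char) : (fA res p).length = res.length := by
  simpa [fA] using
    selfUpdate_length (fun j x => decide (x = -1 ∧ p.2 = asciiLowercase.getD j ' ')) p.1
      (List.range 26) res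

theorem fA_getD (res : List Int) (p : Int × Char) (m : Nat) (hm : m < res.length) (hm26 : m < 26) :
    (fA res p).getD m 0
      = if res.getD m 0 = -1 ∧ p.2 = asciiLowercase.getD m ' ' then p.1 else res.getD m 0 := by
  have := selfUpdate_getD (fun j x => decide (x = -1 ∧ p.2 = asciiLowercase.getD j ' ')) p.1
      (List.range 26) res m (List.nodup_range) hm
  simpa [fA, List.mem_range, hm26, -List.getD_eq_getElem?_getD] using this

theorem A_fold (ps : List (Int × Char)) (res : List Int) (hlen : res.length = 26)
    (hpos : ∀ p ∈ ps, 0 ≤ p.1) (m : Nat) (hm : m < 26) :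
    (ps.foldl fA res).getD m 0
      = if res.getD m 0 = -1 then findD ps (asciiLowercase.getD m ' ') (-1) else res.getD m 0 := by
  induction ps generalizing res with
  | nil =>
    simp only [List.foldl_nil, findD_nil]
    split
    · next h => exact h
    · rfl
  | cons p ps ih =>
    have hmr : m < res.length := by omega
    have hlen' : (fA res p).length = 26 := by rw [fA_length]; exact hlen
    have hpos' : ∀ q ∈ ps, 0 ≤ q.1 := fun q hq => hpos q (List.mem_cons_of_mem p hq)
    have hp : 0 ≤ p.1 := hpos p List.mem_cons_self
    rw [List.foldl_cons, ih (fA res p) hlen' hpos', fA_getD res p m hmr hm]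
    obtain ⟨i, ch⟩ := p
    rw [findD_cons]
    by_cases h1 : res.getD m 0 = -1
    · by_cases h2 : ch = asciiLowercase.getD m ' '
      · simp only [h1, h2, and_self, if_pos]
        have : ¬ (i = -1) := by simp at hp ⊢; omega
        simp [this]
      · simp [h1, h2, -List.getD_eq_getElem?_getD]
    · simp [h1, -List.getD_eq_getElem?_getD]

-- B's per-character step
def fB (res : List Int) (p : Int × Char) : List Int :=
  if 0 ≤ ((p.2.toNat : Int) - 97) ∧ ((p.2.toNat : Int) - 97) < 26 then
    PySem.List.pySetD res ((p.2.toNat : Int) - 97) p.1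
  else res

theorem fB_length (res : List Int) (p : Int × Char) : (fB res p).length = res.length := by
  unfold fB; split <;> simp [PySem.List.length_pySetD]

theorem foldrB_length (ps : List (Int × Char)) (res : List Int) :
    (ps.foldr (fun p r => fB r p) res).length = res.length := by
  induction ps with
  | nil => rfl
  | cons p ps ih => rw [List.foldr_cons, fB_length, ih]

-- character arithmetic: ord c - 97 hits slot m exactly when c is the m-th lowercase letter
theorem char_eq_lo (c : Char) (m : Nat) (hm : m < 26) :
    c = asciiLowercase.getD m ' ' ↔ c.toNat = 97 + m := by
  have hlo : (asciiLowercase.getD m ' ').toNat = 97 + m := by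
    interval_cases m <;> rfl
  constructor
  · intro h; rw [h, hlo]
  · intro h
    exact Char.ext (UInt32.toNat_inj.mp (by rw [show c.val.toNat = c.toNat from rfl, h, ← hlo]; rfl))

theorem fB_match (r : List Int) (i : Int) (ch : Char) (m : Nat) (hm : m < 26)
    (hch : ch.toNat = 97 + m) : fB r (i, ch) = r.set m i := by
  have h0 : ((ch.toNat : Int) - 97) = (m : Int) := by rw [hch]; push_cast; ring
  unfold fB
  dsimp only
  rw [if_pos ⟨by omega, by omega⟩, PySem.List.pySetD_of_nonneg _ _ (by omega)]
  congr 1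
  omega

theorem fB_other (r : List Int) (i : Int) (ch : Char) (m : Nat)
    (hne : ch.toNat ≠ 97 + m) : (fB r (i, ch)).getD m 0 = r.getD m 0 := by
  unfold fB
  dsimp only
  split
  · next hin =>
    rw [PySem.List.pySetD_of_nonneg _ _ hin.1]
    have hk : (((ch.toNat : Int) - 97)).toNat ≠ m := by omega
    simp [List.getD, List.getElem?_set_ne hk]
  · rfl

theorem B_fold (ps : List (Int × Char)) (res : List Int) (hlen : res.length = 26)
    (m : Nat) (hm : m < 26) :
    (ps.foldr (fun p r => fB r p) res).getD m 0
      = findD ps (asciiLowercase.getD m ' ') (res.getD m 0) := by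
  induction ps with
  | nil => rfl
  | cons p ps ih =>
    obtain ⟨i, ch⟩ := p
    have hrlen : (ps.foldr (fun p r => fB r p) res).length = 26 := by
      rw [foldrB_length]; exact hlen
    rw [List.foldr_cons, findD_cons]
    by_cases hc : ch = asciiLowercase.getD m ' '
    · have hch : ch.toNat = 97 + m := (char_eq_lo ch m hm).mp hc
      rw [fB_match _ i ch m hm hch, if_pos hc]
      simp [List.getD, hrlen, hm]
    · have hne : ch.toNat ≠ 97 + m := fun h => hc ((char_eq_lo ch m hm).mpr h)
      rw [if_neg hc, ← ih, fB_other _ i ch m hne]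

theorem foldlA_length (ps : List (Int × Char)) (res : List Int) :
    (ps.foldl fA res).length = res.length := by
  induction ps generalizing res with
  | nil => rfl
  | cons p ps ih => rw [List.foldl_cons, ih, fA_length]

theorem getD_replicate26 (m : Nat) (hm : m < 26) :
    (List.replicate 26 (-1 : Int)).getD m 0 = -1 := by
  rw [List.getD_eq_getElem _ _ (by simpa using hm), List.getElem_replicate]

theorem bodyA_eq (cs : List Char) (r : List Int) (i : Int) :
    (PySem.List.pyRange 0 26 1).foldl (fun res j =>
        if PySem.List.pyGetD res j 0 = -1 ∧
            PySem.List.pyGetD cs i ' ' = PySem.List.pyGetD asciiLowercase j ' '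
        then PySem.List.pySetD res j i else res) r
      = fA r (i, PySem.List.pyGetD cs i ' ') := by
  rw [show (26 : Int) = ((26 : Nat) : Int) by norm_num, PySem.List.pyRange_zero_nat,
      List.foldl_map]
  unfold fA
  dsimp only
  simp only [PySem.List.pyGetD_natCast, PySem.List.pySetD_natCast]

theorem bodyB_eq (cs : List Char) (r : List Int) (i : Int) :
    (fun result i =>
      if 0 ≤ ((PySem.List.pyGetD cs i ' ').toNat : Int) - 97 ∧
          ((PySem.List.pyGetD cs i ' ').toNat : Int) - 97 < 26
      then PySem.List.pySetD result (((PySem.List.pyGetD cs i ' ').toNat : Int) - 97) i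
      else result) r i
      = fB r (i, PySem.List.pyGetD cs i ' ') := rfl

theorem get_idx_naive_spec : Claim_equal_get_idx_naive := by
  unfold Claim_equal_get_idx_naive
  intro word _
  unfold Spec_get_idx_naive
  have hA : get_idx_naive word
      = (PySem.List.enumerate word.toList 0).foldl fA (List.replicate 26 (-1)) := by
    simp only [get_idx_naive]
    rw [PySem.List.enumerate_eq_map_pyRange word.toList ' ', List.foldl_map,
        PySem.List.len_eq]
    simp only [bodyA_eq]
  have hB : get_idx_naive_alt word
      = (PySem.List.enumerate word.toList 0).foldr (fun p r => fB r p)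
          (List.replicate 26 (-1)) := by
    simp only [get_idx_naive_alt]
    rw [← List.foldl_reverse, PySem.List.enumerate_eq_map_pyRange word.toList ' ',
        ← List.map_reverse, List.foldl_map, PySem.List.len_eq]
    simp only [bodyB_eq]
  rw [hA, hB]
  have hlenA : ((PySem.List.enumerate word.toList 0).foldl fA
      (List.replicate 26 (-1))).length = 26 := by
    rw [foldlA_length]; simp
  have hlenB : ((PySem.List.enumerate word.toList 0).foldr (fun p r => fB r p)
      (List.replicate 26 (-1))).length = 26 := by
    rw [foldrB_length]; simp
  have hpos : ∀ p ∈ PySem.List.enumerate word.toList 0, 0 ≤ p.1 := by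
    intro p hp
    rw [PySem.List.mem_enumerate_iff] at hp
    obtain ⟨k, hk, rfl⟩ := hp
    simp
  apply List.ext_getElem (by rw [hlenA, hlenB])
  intro m hm1 hm2
  have hm : m < 26 := by rw [hlenA] at hm1; exact hm1
  rw [← List.getD_eq_getElem _ 0 hm1, ← List.getD_eq_getElem _ 0 hm2]
  rw [A_fold (PySem.List.enumerate word.toList 0) (List.replicate 26 (-1)) (by simp) hpos m hm,
      B_fold (PySem.List.enumerate word.toList 0) (List.replicate 26 (-1)) (by simp) m hm,
      getD_replicate26 m hm]
  simp
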